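-- pv_equiv track=rewrite | github.com/zhangpeng96/PAT | PAT-B/b1017/b1017.py | big_divide
-- ===== SOURCE A (Python) =====
-- def big_divide(dividend, divisor):
-- 	if dividend == 0:
-- 		return (0, divisor)
-- 	divisor = int(divisor)
-- 	quotient = ''
-- 	mod = 0
-- 	for i in dividend:
-- 		dig = mod*10 + int(i)
-- 		quot = dig // divisor
-- 		mod = dig % divisor
-- 		quotient += str(quot)
-- 	return (int(quotient), mod)
-- ===== SOURCE B (Python) =====
-- def big_divide(dividend, divisor):
-- 	if dividend == 0:
-- 		return (0, divisor)
-- 	divisor = int(divisor)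
-- 	n = int(dividend)
-- 	return (n // divisor, n % divisor)
-- ===== Notes on version B (the rewrite author's own statement) =====
-- stated objective: simpler
-- what changed: Replaces the digitwise schoolbook long-division loop (building the quotient as a string and re-parsing it) with a single big-integer divmod: n = int(dividend); return (n // divisor, n % divisor).
-- outside the precondition, e.g. on big_divide('907', -4): A returns (-373, -1), B returns (-227, -1); on big_divide('123', -4): A raises ValueError, B returns (-31, -1); on big_divide('123', 0): A raises ZeroDivisionError, B raises ZeroDivisionError
import Mathlib
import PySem

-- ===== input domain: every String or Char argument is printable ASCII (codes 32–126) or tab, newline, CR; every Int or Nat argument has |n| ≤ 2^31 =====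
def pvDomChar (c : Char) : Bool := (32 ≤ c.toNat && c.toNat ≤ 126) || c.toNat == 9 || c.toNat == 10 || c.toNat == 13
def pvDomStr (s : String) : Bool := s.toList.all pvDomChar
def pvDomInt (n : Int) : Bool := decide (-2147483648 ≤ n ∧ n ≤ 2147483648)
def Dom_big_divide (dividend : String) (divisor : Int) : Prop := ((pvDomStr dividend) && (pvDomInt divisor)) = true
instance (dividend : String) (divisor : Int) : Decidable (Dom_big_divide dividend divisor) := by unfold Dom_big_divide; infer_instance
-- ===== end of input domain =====

-- B replaces A's digitwise long-division loop (which builds the quotient as a string and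
-- re-parses it) with a single parse of the dividend and one divmod; equal on Pre_ inputs.

-- ===== PORT A =====
-- one loop step of A: dig = mod*10 + int(i); quot = dig // divisor; mod = dig % divisor; quotient += str(quot)
def stepA (divisor : Int) (st : List Char × Int) (i : Char) : List Char × Int :=
  let dig := st.2 * 10 + (PySem.Int.ofChars? [i]).getD 0   -- int(i); none = ValueError, excluded by Pre_
  let quot := PySem.Int.floordiv dig divisor               -- divisor = 0 raises ZeroDivisionError, excluded by Pre_
  let mod := PySem.Int.mod dig divisor
  (st.1 ++ PySem.Int.toChars quot, mod)

def big_divide (dividend : String) (divisor : Int) : Int × Int :=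
  -- Python's `if dividend == 0:` compares a str with the int 0 and is always False here; no branch needed.
  -- `divisor = int(divisor)` is the identity on an int.
  let st := dividend.toList.foldl (stepA divisor) ([], 0)
  ((PySem.Int.ofChars? st.1).getD 0, st.2)                 -- int(quotient); none = ValueError, excluded by Pre_

-- ===== PORT B =====
def big_divide_alt (dividend : String) (divisor : Int) : Int × Int :=
  -- Python's `if dividend == 0:` is always False for a str; `divisor = int(divisor)` is the identity.
  let n := (PySem.Int.ofStr? dividend).getD 0              -- int(dividend); none = ValueError, excluded by Pre_
  (PySem.Int.floordiv n divisor, PySem.Int.mod n divisor)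

-- ===== PRECONDITION & SPEC =====
-- Pre_ excludes empty or non-digit dividends (int() raises ValueError), divisor = 0 (ZeroDivisionError),
-- and negative divisors with a nontrivial dividend, on which A either raises ValueError (a '-' lands
-- mid-quotient) or returns an accidental value obtained by digit-concatenating signed partial quotients;
-- negative divisors with a one-digit or all-zero dividend stay inside Pre_ (A and B agree there).
def Pre_big_divide (dividend : String) (divisor : Int) : Prop :=
  dividend.toList ≠ [] ∧ dividend.toList.all Char.isDigit = true ∧
    (1 ≤ divisor ∨ (divisor ≤ -1 ∧ (dividend.toList.length = 1 ∨ dividend.toList.all (· == '0') = true)))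
instance (dividend : String) (divisor : Int) : Decidable (Pre_big_divide dividend divisor) := by
  unfold Pre_big_divide; infer_instance
def pvWitness_big_divide : String × Int := ("123", 4)

def Spec_big_divide (dividend : String) (divisor : Int) (out : Int × Int) : Prop := out = big_divide_alt dividend divisor
instance (dividend : String) (divisor : Int) (out : Int × Int) : Decidable (Spec_big_divide dividend divisor out) := by unfold Spec_big_divide; infer_instance

-- ===== CLAIM (what is proved, stated in full; the proofs are below) =====
def Claim_equal_big_divide : Prop := ∀ (dividend : String) (divisor : Int), Dom_big_divide dividend divisor → Pre_big_divide dividend divisor → Spec_big_divide dividend divisor (big_divide dividend divisor)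

-- ===== LEMMAS AND PROOFS =====

-- value of a digit string, Nat accumulator form (what PySem's private digit parser computes)
def accFoldN (a : Nat) (cs : List Char) : Nat := cs.foldl (fun x c => x * 10 + (c.toNat - 48)) a
-- value of a digit string, Int accumulator form (what the long division processes)
def valI (v : Int) (cs : List Char) : Int := cs.foldl (fun x c => x * 10 + ((c.toNat : Int) - 48)) v

-- PySem.Int.ofChars? with its (private) digit parser abstracted out
def ofCharsVia (g : List Char → Bool → Nat → Option Nat) (s : List Char) : Option Int :=
  let dv : List Char → Option Nat := fun cs =>
    match cs with
    | [] => none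
    | cs => g cs false 0
  have cs := (List.dropWhile PySem.Int.isIntSpace (List.dropWhile PySem.Int.isIntSpace s).reverse).reverse
  match cs with
  | '-' :: ds => Option.map (fun n => -n) (do let a ← dv ds; pure ((a : Int)))
  | '+' :: ds => Option.map (fun n => n) (do let a ← dv ds; pure ((a : Int)))
  | ds => Option.map (fun n => n) (do let a ← dv ds; pure ((a : Int)))

theorem go_exists : ∃ g : List Char → Bool → Nat → Option Nat,
    (∀ s, PySem.Int.ofChars? s = ofCharsVia g s) ∧
    (∀ b a, g [] b a = if b then some a else none) ∧
    (∀ c rest b a, c.isDigit = true → g (c :: rest) b a = g rest true (a * 10 + (c.toNat - '0'.toNat))) := by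
  refine ⟨_, fun s => rfl, ?_, ?_⟩
  · intro b a; rfl
  · intro c rest b a hc
    conv => lhs; whnf
    rw [hc]; rfl

theorem digit_bounds (c : Char) (hc : c.isDigit = true) : 48 ≤ c.toNat ∧ c.toNat ≤ 57 := by
  simp only [Char.isDigit, decide_eq_true_eq, Bool.and_eq_true] at hc
  obtain ⟨h1, h2⟩ := hc
  simp only [Char.toNat]
  exact ⟨UInt32.le_iff_toNat_le.mp h1, UInt32.le_iff_toNat_le.mp h2⟩

theorem isIntSpace_false (c : Char) (hc : c.isDigit = true) : PySem.Int.isIntSpace c = false := by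
  have h := digit_bounds c hc
  simp only [PySem.Int.isIntSpace, Bool.or_eq_false_iff, decide_eq_false_iff_not]
  refine ⟨⟨⟨⟨⟨?_, ?_⟩, ?_⟩, ?_⟩, ?_⟩, ?_⟩ <;> (rintro rfl; simp [Char.toNat] at h)

theorem dropWhile_digits (cs : List Char) (h : ∀ c ∈ cs, c.isDigit = true) :
    List.dropWhile PySem.Int.isIntSpace cs = cs := by
  cases cs with
  | nil => rfl
  | cons c t => simp [isIntSpace_false c (h c (by simp))]

theorem ofChars?_digits (cs : List Char) (h1 : cs ≠ []) (h2 : ∀ c ∈ cs, c.isDigit = true) :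
    PySem.Int.ofChars? cs = some ((accFoldN 0 cs : Nat) : Int) := by
  obtain ⟨g, hlink, hbase, hstep⟩ := go_exists
  have hg : ∀ (l : List Char) (b : Bool) (a : Nat), (∀ c ∈ l, c.isDigit = true) →
      (b = true ∨ l ≠ []) → g l b a = some (accFoldN a l) := by
    intro l
    induction l with
    | nil =>
      rintro b a _ (rfl | hne)
      · rw [hbase]; rfl
      · exact absurd rfl hne
    | cons c t ih =>
      intro b a hdig _
      rw [hstep c t b a (hdig c (by simp))]
      rw [ih true _ (fun x hx => hdig x (by simp [hx])) (Or.inl rfl)]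
      rfl
  rw [hlink]
  have hstrip : (List.dropWhile PySem.Int.isIntSpace
      (List.dropWhile PySem.Int.isIntSpace cs).reverse).reverse = cs := by
    rw [dropWhile_digits cs h2, dropWhile_digits cs.reverse (by simpa using h2), List.reverse_reverse]
  rcases cs with _ | ⟨c, t⟩
  · exact absurd rfl h1
  · have hc := h2 c (by simp)
    simp only [ofCharsVia, hstrip]
    split
    · rename_i heq
      rw [List.cons.injEq] at heq
      exact absurd (heq.1 ▸ hc) (by decide)
    · rename_i heq
      rw [List.cons.injEq] at heq
      exact absurd (heq.1 ▸ hc) (by decide)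
    · simp [hg (c :: t) false 0 h2 (Or.inr (by simp))]

theorem castAcc (cs : List Char) (a : Nat) (h : ∀ c ∈ cs, c.isDigit = true) :
    ((accFoldN a cs : Nat) : Int) = valI (a : Int) cs := by
  induction cs generalizing a with
  | nil => rfl
  | cons c t ih =>
    have hb := digit_bounds c (h c (by simp))
    simp only [accFoldN, valI, List.foldl_cons] at *
    rw [ih _ (fun x hx => h x (by simp [hx]))]
    congr 1
    push_cast [Nat.sub_add_cancel]
    omega

theorem toChars_digit (q : Int) (h0 : 0 ≤ q) (h9 : q ≤ 9) :
    PySem.Int.toChars q = [Char.ofNat (q.toNat + 48)] ∧ (Char.ofNat (q.toNat + 48)).isDigit = true ∧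
      (Char.ofNat (q.toNat + 48)).toNat = q.toNat + 48 := by
  interval_cases q <;> exact ⟨rfl, rfl, rfl⟩

theorem divstep (d v e : Int) (hd : 1 ≤ d) (he0 : 0 ≤ e) (he9 : e ≤ 9) :
    PySem.Int.floordiv (v * 10 + e) d
        = 10 * PySem.Int.floordiv v d + PySem.Int.floordiv (PySem.Int.mod v d * 10 + e) d ∧
      PySem.Int.mod (v * 10 + e) d = PySem.Int.mod (PySem.Int.mod v d * 10 + e) d ∧
      0 ≤ PySem.Int.floordiv (PySem.Int.mod v d * 10 + e) d ∧
      PySem.Int.floordiv (PySem.Int.mod v d * 10 + e) d ≤ 9 := by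
  have hd0 : (0:Int) < d := by omega
  have hr0 : 0 ≤ PySem.Int.mod v d := PySem.Int.mod_nonneg v hd0
  have hr1 : PySem.Int.mod v d < d := PySem.Int.mod_lt v hd0
  have hq9 : PySem.Int.floordiv (PySem.Int.mod v d * 10 + e) d ≤ 9 := by
    have := (PySem.Int.floordiv_lt_iff_lt_mul (a := PySem.Int.mod v d * 10 + e) (b := d) (q := 10) hd0).mpr (by omega)
    omega
  have hq0 : 0 ≤ PySem.Int.floordiv (PySem.Int.mod v d * 10 + e) d := by
    have := (PySem.Int.le_floordiv_iff_mul_le (a := PySem.Int.mod v d * 10 + e) (b := d) (q := 0) hd0).mpr (by omega)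
    omega
  have h1 := PySem.Int.floordiv_mul_add_mod v d
  have h2 := PySem.Int.floordiv_mul_add_mod (PySem.Int.mod v d * 10 + e) d
  have hm0 : 0 ≤ PySem.Int.mod (PySem.Int.mod v d * 10 + e) d := PySem.Int.mod_nonneg _ hd0
  have hm1 : PySem.Int.mod (PySem.Int.mod v d * 10 + e) d < d := PySem.Int.mod_lt _ hd0
  have key : PySem.Int.floordiv (v * 10 + e) d = 10 * PySem.Int.floordiv v d + PySem.Int.floordiv (PySem.Int.mod v d * 10 + e) d ∧
      PySem.Int.mod (v * 10 + e) d = PySem.Int.mod (PySem.Int.mod v d * 10 + e) d := by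
    rw [show PySem.Int.floordiv (v * 10 + e) d = (v * 10 + e) / d from PySem.Int.floordiv_eq_ediv_of_pos hd0,
        show PySem.Int.mod (v * 10 + e) d = (v * 10 + e) % d from PySem.Int.mod_eq_emod_of_pos hd0]
    have := Int.ediv_emod_unique (a := v * 10 + e) (b := d)
      (q := 10 * PySem.Int.floordiv v d + PySem.Int.floordiv (PySem.Int.mod v d * 10 + e) d)
      (r := PySem.Int.mod (PySem.Int.mod v d * 10 + e) d) (by omega)
    refine this.mpr ⟨by linear_combination 10 * h1 + h2, hm0, hm1⟩
  exact ⟨key.1, key.2, hq0, hq9⟩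

theorem loopA (d : Int) (hd : 1 ≤ d) :
    ∀ (p q : List Char) (m v : Int), (∀ c ∈ p, c.isDigit = true) → (∀ c ∈ q, c.isDigit = true) →
      ((accFoldN 0 q : Nat) : Int) = PySem.Int.floordiv v d → m = PySem.Int.mod v d → 0 ≤ v →
      (∀ c ∈ (p.foldl (stepA d) (q, m)).1, c.isDigit = true) ∧
        (p.foldl (stepA d) (q, m)).1.length = q.length + p.length ∧
        ((accFoldN 0 (p.foldl (stepA d) (q, m)).1 : Nat) : Int) = PySem.Int.floordiv (valI v p) d ∧
        (p.foldl (stepA d) (q, m)).2 = PySem.Int.mod (valI v p) d := by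
  intro p
  induction p with
  | nil =>
    intro q m v hq hdq hacc hm hv
    simpa [valI] using ⟨hdq, hacc, hm⟩
  | cons c t ih =>
    intro q m v hp hdq hacc hm hv
    have hc : c.isDigit = true := hp c (by simp)
    have hb := digit_bounds c hc
    have he : (PySem.Int.ofChars? [c]).getD 0 = ((c.toNat : Int) - 48) := by
      rw [ofChars?_digits [c] (by simp) (by simpa using hc)]
      simp only [Option.getD_some, accFoldN, List.foldl_cons, List.foldl_nil]
      omega
    have he0 : (0:Int) ≤ (c.toNat : Int) - 48 := by omega
    have he9 : ((c.toNat : Int) - 48) ≤ 9 := by omega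
    obtain ⟨hfd, hfm, hq0, hq9⟩ := divstep d v ((c.toNat : Int) - 48) hd he0 he9
    obtain ⟨htc, hdigch, htoNat⟩ :=
      toChars_digit (PySem.Int.floordiv (PySem.Int.mod v d * 10 + ((c.toNat : Int) - 48)) d) hq0 hq9
    have hstep1 : stepA d (q, m) c =
        (q ++ [Char.ofNat ((PySem.Int.floordiv (PySem.Int.mod v d * 10 + ((c.toNat : Int) - 48)) d).toNat + 48)],
         PySem.Int.mod (PySem.Int.mod v d * 10 + ((c.toNat : Int) - 48)) d) := by
      simp only [stepA, he, hm, htc]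
    have hval : valI v (c :: t) = valI (v * 10 + ((c.toNat : Int) - 48)) t := by
      simp [valI]
    have hacc' : ((accFoldN 0 (q ++ [Char.ofNat ((PySem.Int.floordiv (PySem.Int.mod v d * 10 + ((c.toNat : Int) - 48)) d).toNat + 48)]) : Nat) : Int)
        = PySem.Int.floordiv ((v * 10 + ((c.toNat : Int) - 48))) d := by
      have happ : accFoldN 0 (q ++ [Char.ofNat ((PySem.Int.floordiv (PySem.Int.mod v d * 10 + ((c.toNat : Int) - 48)) d).toNat + 48)])
          = accFoldN 0 q * 10 + ((PySem.Int.floordiv (PySem.Int.mod v d * 10 + ((c.toNat : Int) - 48)) d).toNat + 48 - 48) := by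
        simp [accFoldN, List.foldl_append, htoNat]
      rw [happ, hfd]
      push_cast
      omega
    have hdq' : ∀ x ∈ q ++ [Char.ofNat ((PySem.Int.floordiv (PySem.Int.mod v d * 10 + ((c.toNat : Int) - 48)) d).toNat + 48)], x.isDigit = true := by
      intro x hx
      rcases List.mem_append.mp hx with h | h
      · exact hdq x h
      · simp only [List.mem_singleton] at h
        exact h ▸ hdigch
    have hrec := ih _ _ (v * 10 + ((c.toNat : Int) - 48))
      (fun x hx => hp x (by simp [hx])) hdq' hacc' hfm.symm (by omega)
    rw [List.foldl_cons, hstep1, hval]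
    refine ⟨hrec.1, ?_, hrec.2.2.1, hrec.2.2.2⟩
    rw [hrec.2.1]
    simp [List.length_append]
    omega



theorem pyZeroDiv (d : Int) (hd : d ≠ 0) : PySem.Int.floordiv 0 d = 0 ∧ PySem.Int.mod 0 d = 0 := by
  rcases lt_or_gt_of_ne hd with hneg | hpos
  · have h1 := PySem.Int.floordiv_mul_add_mod 0 d
    have h2 := PySem.Int.mod_neg_bounds (a := 0) (b := d) hneg
    have hq : PySem.Int.floordiv 0 d = 0 := by nlinarith [h2.1, h2.2]
    exact ⟨hq, by rw [hq] at h1; linarith⟩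
  · rw [PySem.Int.floordiv_eq_ediv_of_pos hpos, PySem.Int.mod_eq_emod_of_pos hpos]
    simp

theorem roundtrip_small (q : Int) (h1 : -9 ≤ q) (h2 : q ≤ 0) :
    PySem.Int.ofChars? (PySem.Int.toChars q) = some q := by
  interval_cases q <;> decide

theorem floordiv_small_neg (d e : Int) (hd : d ≤ -1) (he0 : 0 ≤ e) (he9 : e ≤ 9) :
    -9 ≤ PySem.Int.floordiv e d ∧ PySem.Int.floordiv e d ≤ 0 := by
  have h1 := PySem.Int.floordiv_mul_add_mod e d
  have h2 := PySem.Int.mod_neg_bounds (a := e) (b := d) (by omega)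
  constructor <;> nlinarith [h2.1, h2.2]

theorem ofCharsSingle (c : Char) (hc : c.isDigit = true) :
    (PySem.Int.ofChars? [c]).getD 0 = ((c.toNat : Int) - 48) := by
  have hb := digit_bounds c hc
  rw [ofChars?_digits [c] (by simp) (by simpa using hc)]
  simp only [Option.getD_some, accFoldN, List.foldl_cons, List.foldl_nil]
  omega

theorem loopZero (d : Int) (hz1 : PySem.Int.floordiv 0 d = 0) (hz2 : PySem.Int.mod 0 d = 0) :
    ∀ (p q : List Char), (∀ c ∈ p, c = '0') →
      p.foldl (stepA d) (q, 0) = (q ++ p.map (fun _ => '0'), 0) := by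
  intro p
  induction p with
  | nil => intro q _; simp
  | cons c t ih =>
    intro q hp
    have hc := hp c (by simp)
    subst hc
    have hsingle : (0:Int) * 10 + (PySem.Int.ofChars? ['0']).getD 0 = 0 := by decide
    have hstep : stepA d (q, (0:Int)) '0' = (q ++ ['0'], 0) := by
      simp only [stepA, hsingle, hz1, hz2]
      rfl
    rw [List.foldl_cons, hstep, ih _ (fun x hx => hp x (by simp [hx]))]
    simp

theorem accZeros : ∀ p : List Char, (∀ c ∈ p, c = '0') → accFoldN 0 p = 0 := by
  intro p
  induction p with
  | nil => intro _; rfl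
  | cons c t ih =>
    intro hp
    have hc := hp c (by simp)
    subst hc
    have : accFoldN 0 ('0' :: t) = accFoldN 0 t := by simp [accFoldN]
    rw [this, ih (fun x hx => hp x (by simp [hx]))]

theorem valZeros : ∀ p : List Char, (∀ c ∈ p, c = '0') → valI 0 p = 0 := by
  intro p
  induction p with
  | nil => intro _; rfl
  | cons c t ih =>
    intro hp
    have hc := hp c (by simp)
    subst hc
    have : valI 0 ('0' :: t) = valI 0 t := by simp [valI]
    rw [this, ih (fun x hx => hp x (by simp [hx]))]

-- ===== VERDICT (by name: the statement is the Claim_ definition above) =====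
theorem big_divide_spec : Claim_equal_big_divide := by
  intro dividend divisor _ hpre
  obtain ⟨hne, hall, hcase⟩ := hpre
  have hdig : ∀ c ∈ dividend.toList, c.isDigit = true := by simpa using hall
  rcases hcase with hd | ⟨hdneg, htriv⟩
  · -- positive divisor: the long-division invariant
    have hd0 : (0:Int) < divisor := by omega
    have hz1 : PySem.Int.floordiv 0 divisor = 0 := by
      rw [PySem.Int.floordiv_eq_ediv_of_pos hd0]; simp
    have hz2 : (0:Int) = PySem.Int.mod 0 divisor := by
      rw [PySem.Int.mod_eq_emod_of_pos hd0]; simp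
    have hinv := loopA divisor hd dividend.toList [] 0 0 hdig (by simp)
      (by simpa [accFoldN] using hz1 ▸ rfl) hz2 le_rfl
    obtain ⟨hdq, hlen, haccf, hmf⟩ := hinv
    have hrne : (dividend.toList.foldl (stepA divisor) ([], 0)).1 ≠ [] := by
      intro h
      rw [h] at hlen
      simp at hlen
      exact hne (List.eq_nil_of_length_eq_zero hlen.symm)
    have hAq := ofChars?_digits _ hrne hdq
    have hB : PySem.Int.ofStr? dividend = some (valI 0 dividend.toList) := by
      rw [PySem.Int.ofStr?.eq_1, ofChars?_digits _ hne hdig]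
      have := castAcc dividend.toList 0 hdig
      simpa using this
    unfold Spec_big_divide big_divide big_divide_alt
    simp only [hB, hAq, Option.getD_some]
    exact Prod.ext haccf hmf
  · -- negative divisor, trivial dividend (one digit or all zeros): both sides agree
    obtain ⟨hfl0, hmd0⟩ := pyZeroDiv divisor (by omega)
    rcases htriv with hlen | hzb
    · -- one-digit dividend
      obtain ⟨c, hc⟩ := List.length_eq_one_iff.mp hlen
      have hcd : c.isDigit = true := hdig c (by rw [hc]; simp)
      have hb := digit_bounds c hcd
      have hone := ofCharsSingle c hcd
      obtain ⟨hq1, hq2⟩ := floordiv_small_neg divisor ((c.toNat : Int) - 48) hdneg (by omega) (by omega)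
      have h010 : (0:Int) * 10 + ((c.toNat : Int) - 48) = (c.toNat : Int) - 48 := by ring
      have hB : big_divide_alt dividend divisor =
          (PySem.Int.floordiv ((c.toNat : Int) - 48) divisor, PySem.Int.mod ((c.toNat : Int) - 48) divisor) := by
        unfold big_divide_alt
        rw [PySem.Int.ofStr?.eq_1, hc, ofChars?_digits [c] (by simp) (by simpa using hcd)]
        simp only [Option.getD_some, accFoldN, List.foldl_cons, List.foldl_nil]
        have hcast : ((0 * 10 + (c.toNat - 48) : Nat) : Int) = (c.toNat : Int) - 48 := by omega
        rw [hcast]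
      have hA : big_divide dividend divisor =
          (PySem.Int.floordiv ((c.toNat : Int) - 48) divisor, PySem.Int.mod ((c.toNat : Int) - 48) divisor) := by
        unfold big_divide
        rw [hc]
        simp only [List.foldl_cons, List.foldl_nil, stepA, hone, h010, List.nil_append]
        rw [roundtrip_small _ hq1 hq2]
        rfl
      unfold Spec_big_divide
      rw [hA, hB]
    · -- all-zero dividend
      have hz : ∀ x ∈ dividend.toList, x = '0' := by simpa using hzb
      have hmapz : ∀ x ∈ dividend.toList.map (fun _ => '0'), x = '0' := by simp
      have hmapne : dividend.toList.map (fun _ => '0') ≠ [] := by simpa using hne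
      have hA : big_divide dividend divisor = (0, 0) := by
        unfold big_divide
        simp only [loopZero divisor hfl0 hmd0 dividend.toList [] hz, List.nil_append]
        rw [ofChars?_digits _ hmapne (fun x hx => by rw [hmapz x hx]; rfl),
            accZeros _ hmapz]
        rfl
      have hB : big_divide_alt dividend divisor = (0, 0) := by
        unfold big_divide_alt
        rw [PySem.Int.ofStr?.eq_1, ofChars?_digits _ hne hdig]
        have hcast := castAcc dividend.toList 0 hdig
        simp only [Option.getD_some]
        rw [show ((accFoldN 0 dividend.toList : Nat) : Int) = valI 0 dividend.toList by simpa using hcast,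
            valZeros _ hz, hfl0, hmd0]
      unfold Spec_big_divide
      rw [hA, hB]
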